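-- pv_equiv track=rewrite | github.com/beatzunknown/rop-emporium | fluff32.py | generate_mask
-- ===== SOURCE A (Python) =====
-- BITS_IN_CHAR = 8
--
-- BITS_IN_32BIT_REG = 32
--
-- def generate_mask(c, data):
--     c = ord(c)
--     mask = 0
--     c_i = d_i = 0
--
--     while c_i < BITS_IN_CHAR and d_i < BITS_IN_32BIT_REG:
--         c_bit = 1 << c_i
--         d_bit = 1 << d_i
--
--         # we will only set 8 mask bits, for each bit
--         # of the character.
--         # this will be whenever we find a char bit
--         # matching the data bit (both 1s or both 0s),
--         # because we know that whenever we encounter this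
--         # bit in the data, we want to keep it as part of
--         # the final char output of `pext`
--
--         if (c & c_bit) and (data & d_bit):
--             mask |= d_bit
--             c_i += 1
--         elif not ((c & c_bit) or (data & d_bit)):
--             mask |= d_bit
--             c_i += 1
--         d_i += 1
--
--     return mask
-- ===== SOURCE B (Python) =====
-- BITS_IN_CHAR = 8
--
-- BITS_IN_32BIT_REG = 32
--
-- def generate_mask(c, data):
--     # Bit-trick formulation: instead of scanning data bit-by-bit with a cursor,
--     # repeatedly isolate the lowest still-available data bit that equals the
--     # current char bit, using the x ^ (x - 1) lowest-set-bit trick.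
--     cv = ord(c)
--     d32 = data & 0xFFFFFFFF          # the 32 data bits as a nonnegative int
--     mask = 0
--     avail = 0xFFFFFFFF               # data bit positions not yet consumed
--     for c_i in range(8):
--         base = d32 if (cv >> c_i) & 1 else d32 ^ 0xFFFFFFFF
--         pool = base & avail          # available positions whose bit equals char bit c_i
--         if pool == 0:
--             break
--         low_run = pool ^ (pool - 1)  # ones up through pool's lowest set bit
--         mask |= (low_run + 1) >> 1   # isolate that lowest set bit
--         avail &= 0xFFFFFFFF ^ low_run  # consume all positions up to and including it
--     return mask
-- ===== Notes on version B (the rewrite author's own statement) =====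
-- stated objective: alternative
-- what changed: Replaces A's bit-by-bit two-cursor scan over the 32 data bits with a lowest-set-bit extraction loop: the data word is masked once, and for each of the 8 char bits the matching data bit is isolated in O(1) with the pool ^ (pool - 1) two's-complement-style trick on an availability mask, so no per-bit cursor scan remains.
-- outside the precondition, e.g. on generate_mask('ab', 3): A raises TypeError, B raises TypeError
import Mathlib
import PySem

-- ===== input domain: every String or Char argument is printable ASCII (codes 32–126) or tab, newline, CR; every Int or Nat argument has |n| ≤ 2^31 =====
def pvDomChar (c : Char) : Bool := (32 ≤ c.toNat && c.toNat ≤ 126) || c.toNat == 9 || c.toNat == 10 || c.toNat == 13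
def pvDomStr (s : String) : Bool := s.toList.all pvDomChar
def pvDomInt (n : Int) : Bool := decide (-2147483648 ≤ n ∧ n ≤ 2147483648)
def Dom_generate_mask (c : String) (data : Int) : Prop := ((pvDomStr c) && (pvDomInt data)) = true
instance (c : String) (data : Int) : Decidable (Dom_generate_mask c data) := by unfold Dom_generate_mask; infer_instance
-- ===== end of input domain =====

-- B replaces A's bit-by-bit cursor scan over the data bits with a lowest-set-bit
-- bit-trick loop: for each of the 8 char bits it isolates the lowest still-available
-- matching data bit via the x ^ (x - 1) trick (alternative algorithm, same cost).

-- ===== PORT A =====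
-- A's while loop: both counters as Nat, mask as Int; each iteration advances d_i.
def pvLoopA (cv data mask : Int) (c_i d_i : Nat) : Int :=
  if c_i < 8 ∧ d_i < 32 then
    -- c_bit = 1 << c_i, d_bit = 1 << d_i, written inline
    if PySem.Int.band cv (1 <<< c_i) ≠ 0 ∧ PySem.Int.band data (1 <<< d_i) ≠ 0 then
      pvLoopA cv data (PySem.Int.bor mask (1 <<< d_i)) (c_i + 1) (d_i + 1)
    else if ¬ (PySem.Int.band cv (1 <<< c_i) ≠ 0 ∨ PySem.Int.band data (1 <<< d_i) ≠ 0) then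
      pvLoopA cv data (PySem.Int.bor mask (1 <<< d_i)) (c_i + 1) (d_i + 1)
    else
      pvLoopA cv data mask c_i (d_i + 1)
  else mask
termination_by 32 - d_i
decreasing_by all_goals omega

def generate_mask (c : String) (data : Int) : Int :=
  match c.toList with
  | [ch] => pvLoopA (ch.toNat : Int) data 0 0 0
  | _ => 0   -- ord(c) raises TypeError here; excluded by Pre_generate_mask

-- ===== PORT B =====
-- Source B's for-loop over the 8 char bits; state = (avail, mask); `break` returns mask.
def pvLoopB (cv d32 : Int) (c_i : Nat) (avail mask : Int) : Int :=
  if c_i < 8 then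
    -- base = d32 if (cv >> c_i) & 1 else d32 ^ 0xFFFFFFFF
    let base := if PySem.Int.band (cv >>> c_i) 1 ≠ 0 then d32 else PySem.Int.bxor d32 4294967295
    let pool := PySem.Int.band base avail
    if pool = 0 then mask
    else
      let low_run := PySem.Int.bxor pool (pool - 1)
      pvLoopB cv d32 (c_i + 1) (PySem.Int.band avail (PySem.Int.bxor 4294967295 low_run))
        (PySem.Int.bor mask ((low_run + 1) >>> (1:Nat)))
  else mask
termination_by 8 - c_i
decreasing_by omega

def generate_mask_alt (c : String) (data : Int) : Int :=
  if c.toList.length = 1 then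
    pvLoopB (((c.toList.headD ' ').toNat : Nat) : Int) (PySem.Int.band data 4294967295) 0 4294967295 0
  else 0   -- ord(c) raises TypeError here (outside Pre_generate_mask)

-- ===== PRECONDITION & SPEC =====
-- Pre_ excludes strings that are not exactly one character, on which Python's ord(c) raises TypeError.
def Pre_generate_mask (c : String) (data : Int) : Prop := c.toList.length = 1
instance (c : String) (data : Int) : Decidable (Pre_generate_mask c data) := by unfold Pre_generate_mask; infer_instance
def pvWitness_generate_mask : String × Int := ("A", 5)

def Spec_generate_mask (c : String) (data : Int) (out : Int) : Prop := out = generate_mask_alt c data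
instance (c : String) (data : Int) (out : Int) : Decidable (Spec_generate_mask c data out) := by unfold Spec_generate_mask; infer_instance

-- ===== CLAIM (what is proved, stated in full; the proofs are below) =====
def Claim_equal_generate_mask : Prop := ∀ (c : String) (data : Int), Dom_generate_mask c data → Pre_generate_mask c data → Spec_generate_mask c data (generate_mask c data)

-- ===== LEMMAS AND PROOFS =====

-- the low 32 bits of `data` as a Nat (Source B's d32)
def pvD32 (a : Int) : Nat := (PySem.Int.band a 4294967295).toNat

lemma pv_d32_cast (a : Int) : PySem.Int.band a 4294967295 = ((pvD32 a : Nat) : Int) := by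
  have h : (0:Int) ≤ PySem.Int.band a 4294967295 := by
    rw [PySem.Int.band_comm]
    exact PySem.Int.band_nonneg_of_nonneg_left a (by norm_num)
  simp [pvD32, Int.toNat_of_nonneg h]

-- band on a nonnegative left argument, by definition
lemma pv_band_nonneg (a : Int) (n : Nat) (ha : 0 ≤ a) :
    PySem.Int.band a (n:Int) = ((a.toNat &&& n : Nat) : Int) := by
  unfold PySem.Int.band; simp [ha]

-- band on a negative left argument, by definition
lemma pv_band_neg (a : Int) (n : Nat) (ha : a < 0) :
    PySem.Int.band a (n:Int) = ((n - (n &&& (-a-1).toNat) : Nat) : Int) := by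
  unfold PySem.Int.band
  rw [if_neg (by omega), if_pos (by positivity)]
  simp

-- complement within m bits, bit by bit
lemma pv_testBit_compl : ∀ (i m s : Nat), s < 2^m → (2^m - 1 - s).testBit i = (decide (i < m) && !s.testBit i) := by
  intro i
  induction i with
  | zero =>
    intro m s hs
    cases m with
    | zero => interval_cases s; simp
    | succ m =>
      have h2 : 2^(m+1) = 2*2^m := by ring
      rw [Nat.testBit_zero, Nat.testBit_zero]
      have hm : (2^(m+1) - 1 - s) % 2 = 1 - s % 2 := by omega
      rcases Nat.mod_two_eq_zero_or_one s with h | h <;> simp [hm, h]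
  | succ i ih =>
    intro m s hs
    cases m with
    | zero => interval_cases s; simp
    | succ m =>
      have h2 : 2^(m+1) = 2*2^m := by ring
      rw [Nat.testBit_add_one, Nat.testBit_add_one]
      have hv : (2^(m+1) - 1 - s) / 2 = 2^m - 1 - s/2 := by omega
      rw [hv, ih m (s/2) (by omega)]
      simp

-- A's data-bit test reads exactly bit i of d32
lemma pv_testA (a : Int) (i : Nat) (h : i < 32) :
    (PySem.Int.band a (((1 <<< i : Nat) : Nat) : Int) ≠ 0) ↔ ((pvD32 a).testBit i = true) := by
  have hM : (4294967295:Int) = ((2^32 - 1 : Nat) : Int) := by norm_num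
  have hpow : (0:Nat) < 2^i := Nat.pow_pos (by norm_num)
  rw [show (((1 <<< i : Nat) : Nat) : Int) = ((2^i : Nat) : Int) by rw [Nat.one_shiftLeft]]
  rcases em ((0:Int) ≤ a) with ha | ha
  · rw [pvD32, hM, pv_band_nonneg a _ ha, pv_band_nonneg a _ ha, Int.toNat_natCast]
    rw [Nat.and_two_pow, Nat.testBit_land, Nat.testBit_two_pow_sub_one]
    cases hb : a.toNat.testBit i <;> simp [hb, h] <;> omega
  · have ha' : a < 0 := by omega
    rw [pvD32, hM, pv_band_neg a _ ha', pv_band_neg a _ ha', Int.toNat_natCast]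
    set n := (-a-1).toNat with hn
    have hr : (2^32 - 1 : Nat) &&& n = n % 2^32 := by
      apply Nat.eq_of_testBit_eq
      intro j
      rw [Nat.testBit_land, Nat.testBit_two_pow_sub_one, Nat.testBit_mod_two_pow, Bool.and_comm]
    have hand : (2^i) &&& n = (n.testBit i).toNat * 2^i := by
      rw [Nat.land_comm, Nat.and_two_pow]
    rw [hr, hand, pv_testBit_compl i 32 (n % 2^32) (Nat.mod_lt _ (by norm_num)), Nat.testBit_mod_two_pow]
    cases hb : n.testBit i <;> simp [hb, h] <;> omega

-- A's char-bit test
lemma pv_testC (cv : Nat) (i : Nat) :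
    (PySem.Int.band (cv : Int) (((1 <<< i : Nat) : Nat) : Int) ≠ 0) ↔ (cv.testBit i = true) := by
  rw [show (((1 <<< i : Nat) : Nat) : Int) = ((2^i : Nat) : Int) by rw [Nat.one_shiftLeft]]
  simp only [PySem.Int.band_natCast, Nat.and_two_pow]
  cases hb : cv.testBit i <;> simp [hb]

-- B's char-bit test
lemma pv_testC' (cv : Nat) (i : Nat) :
    (PySem.Int.band ((cv : Int) >>> i) 1 ≠ 0) ↔ (cv.testBit i = true) := by
  have h1 : ((cv : Int) >>> i) = ((cv >>> i : Nat) : Int) := by simp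
  have h2 : (1:Int) = ((1:Nat) : Int) := by norm_num
  rw [h1, h2, PySem.Int.band_natCast, Nat.and_one_is_mod, Nat.shiftRight_eq_div_pow,
    Nat.testBit_eq_decide_div_mod_eq]
  simp only [ne_eq, Int.natCast_eq_zero, decide_eq_true_eq]
  omega

-- bits of avail = 2^32 - 2^d
lemma pv_testBit_avail (d i : Nat) (hd : d ≤ 32) :
    (2^32 - 2^d).testBit i = (decide (d ≤ i) && decide (i < 32)) := by
  have hpp : (2:Nat)^(32-d) * 2^d = 2^32 := by rw [← Nat.pow_add, Nat.sub_add_cancel hd]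
  have hf : (2^32 - 2^d : Nat) = (2^(32-d) - 1) * 2^d := by
    rw [Nat.sub_one_mul, hpp]
  rw [hf, Nat.testBit_mul_two_pow, Nat.testBit_two_pow_sub_one]
  rcases em (d ≤ i) with h | h <;> simp [h] <;> omega

-- the x ^ (x - 1) lowest-set-bit run, hit form
lemma pv_low_run_hit (p k : Nat) (h : p % 2^(k+1) = 2^k) : p ^^^ (p - 1) = 2^(k+1) - 1 := by
  have hk : (0:Nat) < 2^k := Nat.pow_pos (by norm_num)
  have hk1 : (2:Nat)^(k+1) = 2*2^k := by ring
  have hdm := Nat.div_add_mod p (2^(k+1))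
  set q := p / 2^(k+1) with hq
  have hp : p = 2^(k+1) * q + 2^k := by omega
  have hp1 : p - 1 = 2^(k+1) * q + (2^k - 1) := by omega
  apply Nat.eq_of_testBit_eq
  intro i
  rw [Nat.testBit_xor, hp1, hp,
    Nat.testBit_two_pow_mul_add q (i := k+1) (b := 2^k) (by omega),
    Nat.testBit_two_pow_mul_add q (i := k+1) (b := 2^k - 1) (by omega),
    Nat.testBit_two_pow_sub_one, Nat.testBit_two_pow, Nat.testBit_two_pow_sub_one]
  rcases em (i < k + 1) with hi | hi <;> rcases em (i < k) with hi2 | hi2 <;>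
    simp [hi, hi2] <;> omega

-- the x ^ (x - 1) run covers bit k whenever the low k+1 bits of x are clear
lemma pv_low_run_skip (p k : Nat) (hp : p ≠ 0) (h : p % 2^(k+1) = 0) :
    (p ^^^ (p - 1)).testBit k = true := by
  have hk1 : (0:Nat) < 2^(k+1) := Nat.pow_pos (by norm_num)
  have hdm := Nat.div_add_mod p (2^(k+1))
  rw [h] at hdm
  obtain ⟨t, ht⟩ : ∃ t, p / 2^(k+1) = t + 1 := by
    rcases Nat.eq_zero_or_pos (p / 2^(k+1)) with h0 | h0
    · rw [h0, Nat.mul_zero] at hdm; omega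
    · exact ⟨p / 2^(k+1) - 1, by omega⟩
  rw [ht] at hdm
  have hx : 2^(k+1) * (t+1) = 2^(k+1) * t + 2^(k+1) := by ring
  have hp' : p = 2^(k+1) * t + 2^(k+1) := by omega
  have hp1 : p - 1 = 2^(k+1) * t + (2^(k+1) - 1) := by omega
  rw [Nat.testBit_xor, hp1, hp',
    show 2^(k+1) * t + 2^(k+1) = 2^(k+1) * (t+1) by ring,
    Nat.mul_comm (2^(k+1)) (t+1), Nat.testBit_mul_two_pow,
    Nat.testBit_two_pow_mul_add t (i := k+1) (b := 2^(k+1)-1) (by omega),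
    Nat.testBit_two_pow_sub_one]
  simp

-- B's base value, at the Nat level
def pvBaseN (cv dn c_i : Nat) : Nat := if cv.testBit c_i then dn else dn ^^^ (2^32-1)

-- one step of B's loop, with all bit arithmetic pushed down to Nat
lemma pvLoopB_step (cv dn av c_i : Nat) (mask : Int) (hc : c_i < 8) :
    pvLoopB (cv : Int) (dn : Int) c_i (av : Int) mask =
      (if pvBaseN cv dn c_i &&& av = 0 then mask
       else pvLoopB (cv : Int) (dn : Int) (c_i+1)
         ((av &&& ((2^32-1) ^^^ ((pvBaseN cv dn c_i &&& av) ^^^ ((pvBaseN cv dn c_i &&& av) - 1))) : Nat) : Int)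
         (PySem.Int.bor mask ((((((pvBaseN cv dn c_i &&& av) ^^^ ((pvBaseN cv dn c_i &&& av) - 1)) + 1) >>> (1:Nat) : Nat) : Int)))) := by
  rw [pvLoopB]
  rw [if_pos hc]
  have hM : (4294967295:Int) = ((2^32 - 1 : Nat) : Int) := by norm_num
  have hbase : (if PySem.Int.band ((cv:Int) >>> c_i) 1 ≠ 0 then (dn:Int) else PySem.Int.bxor (dn:Int) 4294967295)
      = ((pvBaseN cv dn c_i : Nat) : Int) := by
    unfold pvBaseN
    rcases hb : cv.testBit c_i with _ | _
    · rw [if_neg (by rw [pv_testC']; simp [hb]), if_neg (by simp [hb]), hM, PySem.Int.bxor_natCast]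
    · rw [if_pos (by rw [pv_testC']; exact hb), if_pos (by simp [hb])]
  simp only [hbase, PySem.Int.band_natCast]
  set pN := pvBaseN cv dn c_i &&& av with hpN
  rcases em (pN = 0) with h0 | h0
  · rw [if_pos (by exact_mod_cast congrArg (Nat.cast : Nat → Int) h0), if_pos h0]
  · rw [if_neg (by exact_mod_cast h0), if_neg h0]
    have hsub : ((pN:Int) - 1) = ((pN - 1 : Nat) : Int) := by
      have : 1 ≤ pN := Nat.one_le_iff_ne_zero.mpr h0
      push_cast [this]; ring
    rw [hsub, PySem.Int.bxor_natCast, hM, PySem.Int.bxor_natCast, PySem.Int.band_natCast]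
    have hshift : ((((pN ^^^ (pN-1)) : Nat) : Int) + 1) >>> (1:Nat) = ((((pN ^^^ (pN-1)) + 1) >>> (1:Nat) : Nat) : Int) := by
      rw [show ((((pN ^^^ (pN-1)) : Nat) : Int) + 1) = (((pN ^^^ (pN-1)) + 1 : Nat) : Int) by push_cast; ring]
      simp
    rw [hshift]

-- bits of B's pool, at positions below 32
lemma pv_pool_testBit (cv dn d c_i i : Nat) (hd : d ≤ 32) :
    (pvBaseN cv dn c_i &&& (2^32 - 2^d)).testBit i
      = ((pvBaseN cv dn c_i).testBit i && (decide (d ≤ i) && decide (i < 32))) := by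
  rw [Nat.testBit_land, pv_testBit_avail d i hd]

-- when the current data bit does not match, B's whole step is insensitive to
-- whether that bit position is still marked available
lemma pv_loopB_skip_state (cv dn c_i d : Nat) (mask : Int) (hc : c_i < 8) (hd : d < 32)
    (hbit : (pvBaseN cv dn c_i).testBit d = false) :
    pvLoopB (cv:Int) (dn:Int) c_i (((2^32 - 2^d : Nat)) : Int) mask
      = pvLoopB (cv:Int) (dn:Int) c_i (((2^32 - 2^(d+1) : Nat)) : Int) mask := by
  rw [pvLoopB_step cv dn _ c_i mask hc, pvLoopB_step cv dn _ c_i mask hc]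
  have hpool : pvBaseN cv dn c_i &&& (2^32 - 2^d) = pvBaseN cv dn c_i &&& (2^32 - 2^(d+1)) := by
    apply Nat.eq_of_testBit_eq; intro j
    rw [pv_pool_testBit _ _ _ _ _ (le_of_lt hd), pv_pool_testBit _ _ _ _ _ (by omega)]
    rcases em (j = d) with hj | hj
    · subst hj; simp [hbit]
    · rw [show (decide (d ≤ j)) = (decide (d+1 ≤ j)) from decide_eq_decide.mpr (by omega)]
  rw [hpool]
  set pN := pvBaseN cv dn c_i &&& (2^32 - 2^(d+1)) with hpN
  rcases em (pN = 0) with h0 | h0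
  · rw [if_pos h0, if_pos h0]
  · rw [if_neg h0, if_neg h0]
    have hmod : pN % 2^(d+1) = 0 := by
      apply Nat.eq_of_testBit_eq; intro j
      rw [Nat.testBit_mod_two_pow]
      rcases em (j < d+1) with hj | hj
      · rw [hpN, pv_pool_testBit _ _ _ _ _ (by omega)]
        simp [show ¬ (d+1 ≤ j) by omega, Nat.zero_testBit]
      · simp [hj, Nat.zero_testBit]
    have hbitd := pv_low_run_skip pN d h0 hmod
    have hav : (2^32 - 2^d) &&& ((2^32-1) ^^^ (pN ^^^ (pN - 1)))
        = (2^32 - 2^(d+1)) &&& ((2^32-1) ^^^ (pN ^^^ (pN - 1))) := by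
      apply Nat.eq_of_testBit_eq; intro j
      rw [Nat.testBit_land, Nat.testBit_land, pv_testBit_avail d j (by omega),
        pv_testBit_avail (d+1) j (by omega)]
      rcases em (j = d) with hj | hj
      · subst hj
        rw [Nat.testBit_xor, Nat.testBit_two_pow_sub_one, hbitd]
        simp
      · rw [show (decide (d ≤ j)) = (decide (d+1 ≤ j)) from decide_eq_decide.mpr (by omega)]
    rw [hav]

-- main invariant: A's flat two-cursor loop equals B's bit-trick loop
lemma pv_loop_eq (cv : Nat) (data : Int) :
    ∀ fuel c_i d_i (mask : Int), fuel = 32 - d_i → d_i ≤ 32 →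
      pvLoopA (cv : Int) data mask c_i d_i
        = pvLoopB (cv : Int) ((pvD32 data : Nat) : Int) c_i (((2^32 - 2^d_i : Nat) : Nat) : Int) mask := by
  intro fuel
  induction fuel with
  | zero =>
    intro c_i d_i mask hf hd
    have hd32 : d_i = 32 := by omega
    subst hd32
    rw [pvLoopA, if_neg (by omega)]
    by_cases hc : c_i < 8
    · rw [pvLoopB_step cv (pvD32 data) _ c_i mask hc, if_pos (by simp)]
    · rw [pvLoopB, if_neg hc]
  | succ n ih =>
    intro c_i d_i mask hf hd
    have hdlt : d_i < 32 := by omega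
    by_cases hc : c_i < 8
    · set dn := pvD32 data with hdn
      have hcond1 : (PySem.Int.band (cv:Int) (((1 <<< c_i : Nat) : Nat) : Int) ≠ 0) ↔ (cv.testBit c_i = true) := pv_testC cv c_i
      have hcond2 : (PySem.Int.band data (((1 <<< d_i : Nat) : Nat) : Int) ≠ 0) ↔ (dn.testBit d_i = true) := pv_testA data d_i hdlt
      have hbasebit : (pvBaseN cv dn c_i).testBit d_i = (cv.testBit c_i == dn.testBit d_i) := by
        unfold pvBaseN
        cases hbv : cv.testBit c_i with
        | false =>
          rw [if_neg (by simp [hbv]), Nat.testBit_xor, Nat.testBit_two_pow_sub_one]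
          cases hdv : dn.testBit d_i <;> simp [hdlt]
        | true =>
          rw [if_pos (by simp [hbv])]
          cases hdv : dn.testBit d_i <;> simp
      rcases em (cv.testBit c_i = dn.testBit d_i) with heq | hne
      · -- HIT: A sets the bit and advances both cursors; B isolates the same lowest bit
        have hbt : (pvBaseN cv dn c_i).testBit d_i = true := by rw [hbasebit, heq]; simp
        set pN := pvBaseN cv dn c_i &&& (2^32 - 2^d_i) with hpN
        have hpbit : pN.testBit d_i = true := by
          rw [hpN, pv_pool_testBit cv dn d_i c_i d_i hd, hbt]; simp [hdlt]
        have hp0 : pN ≠ 0 := by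
          intro h0; rw [h0] at hpbit; simp at hpbit
        have hmod : pN % 2^(d_i+1) = 2^d_i := by
          apply Nat.eq_of_testBit_eq
          intro j
          rw [Nat.testBit_mod_two_pow, Nat.testBit_two_pow]
          rcases em (j = d_i) with hj | hj
          · subst hj; simp [hpbit]
          · rcases em (j < d_i + 1) with hj2 | hj2
            · have : j < d_i := by omega
              rw [hpN, pv_pool_testBit cv dn d_i c_i j hd]
              simp [hj2, show ¬ (d_i ≤ j) by omega, show ¬ (d_i = j) by omega]
            · simp [hj2, show ¬ (d_i = j) by omega]
        have hlr : pN ^^^ (pN - 1) = 2^(d_i+1) - 1 := pv_low_run_hit pN d_i hmod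
        have hlow : ((pN ^^^ (pN - 1)) + 1) >>> (1:Nat) = 2^d_i := by
          rw [hlr, Nat.sub_add_cancel (Nat.one_le_two_pow), Nat.shiftRight_eq_div_pow,
            pow_one, pow_succ, Nat.mul_div_cancel _ (by norm_num)]
        have havail : (2^32 - 2^d_i) &&& ((2^32-1) ^^^ (pN ^^^ (pN - 1))) = 2^32 - 2^(d_i+1) := by
          rw [hlr]
          apply Nat.eq_of_testBit_eq
          intro j
          rw [Nat.testBit_land, Nat.testBit_xor, pv_testBit_avail d_i j hd,
            pv_testBit_avail (d_i+1) j (by omega), Nat.testBit_two_pow_sub_one,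
            Nat.testBit_two_pow_sub_one]
          rcases em (d_i ≤ j) with h1 | h1 <;> rcases em (j < 32) with h2 | h2 <;>
            rcases em (j < d_i + 1) with h3 | h3 <;>
              simp [h1, h2, h3, show (d_i + 1 ≤ j) ↔ ¬ (j < d_i + 1) by omega] <;> omega
        have hAbr : pvLoopA (cv:Int) data mask c_i d_i = pvLoopA (cv:Int) data (PySem.Int.bor mask (((1 <<< d_i : Nat) : Nat) : Int)) (c_i+1) (d_i+1) := by
          rw [pvLoopA, if_pos (show c_i < 8 ∧ d_i < 32 from ⟨hc, hdlt⟩)]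
          cases hbv : cv.testBit c_i with
          | false =>
            rw [if_neg (by rw [hcond1, hcond2, hbv, ← heq, hbv]; simp),
              if_pos (by rw [not_or, hcond1, hcond2, hbv, ← heq, hbv]; simp)]
          | true =>
            rw [if_pos ⟨hcond1.mpr hbv, hcond2.mpr (heq ▸ hbv)⟩]
        rw [hAbr, show (((1 <<< d_i : Nat) : Nat) : Int) = ((2^d_i : Nat) : Int) by rw [Nat.one_shiftLeft],
          ih (c_i+1) (d_i+1) (PySem.Int.bor mask (((2^d_i : Nat) : Nat) : Int)) (by omega) (by omega),
          pvLoopB_step cv dn _ c_i mask hc, ← hpN, if_neg hp0, havail, hlow]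
      · -- SKIP: A advances only the data cursor; B's pool and next state are unchanged
        have hbf : (pvBaseN cv dn c_i).testBit d_i = false := by
          rw [hbasebit]
          cases hbv : cv.testBit c_i <;> cases hdv : dn.testBit d_i <;>
            simp_all
        have hAskip : pvLoopA (cv:Int) data mask c_i d_i = pvLoopA (cv:Int) data mask c_i (d_i+1) := by
          rw [pvLoopA, if_pos (show c_i < 8 ∧ d_i < 32 from ⟨hc, hdlt⟩)]
          have h1 : ¬ (PySem.Int.band (cv:Int) (((1 <<< c_i : Nat) : Nat) : Int) ≠ 0 ∧ PySem.Int.band data (((1 <<< d_i : Nat) : Nat) : Int) ≠ 0) := by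
            rw [hcond1, hcond2]
            rintro ⟨ha1, ha2⟩
            exact hne (by rw [ha1, ha2])
          have h2 : ¬ ¬ (PySem.Int.band (cv:Int) (((1 <<< c_i : Nat) : Nat) : Int) ≠ 0 ∨ PySem.Int.band data (((1 <<< d_i : Nat) : Nat) : Int) ≠ 0) := by
            rw [not_not, hcond1, hcond2]
            cases hbv : cv.testBit c_i with
            | true => exact Or.inl rfl
            | false =>
              cases hdv : dn.testBit d_i with
              | true => exact Or.inr rfl
              | false => exact absurd (hbv.trans hdv.symm) hne
          rw [if_neg h1, if_neg h2]
        rw [hAskip, ih c_i (d_i+1) mask (by omega) (by omega)]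
        exact (pv_loopB_skip_state cv dn c_i d_i mask hc hdlt hbf).symm
    · rw [pvLoopA, if_neg (by omega), pvLoopB, if_neg hc]

-- ===== VERDICT (by name: the statement is the Claim_ definition above) =====
theorem generate_mask_spec : Claim_equal_generate_mask := by
  intro c data _ hpre
  unfold Spec_generate_mask generate_mask generate_mask_alt
  unfold Pre_generate_mask at hpre
  match hm : c.toList with
  | [ch] =>
    rw [pv_d32_cast]
    simp only [hm, List.length_cons, List.length_nil, if_pos rfl, List.headD]
    have := pv_loop_eq ch.toNat data 32 0 0 0 rfl (by norm_num)
    norm_num at this ⊢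
    exact this
  | [] => simp [hm] at hpre
  | _ :: _ :: _ => simp [hm] at hpre
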